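-- pv_equiv track=rewrite | github.com/exasol/benchkit | benchkit/report/figures.py | _build_system_color_map
-- ===== SOURCE A (Python) =====
-- from itertools import cycle
-- from typing import Any, Sequence
--
-- TECH_COLORS = ["#2E86AB", "#A23B72", "#F18F01", "#C73E1D", "#577590", "#7209B7"]
--
-- EXASOL_COLOR = "#2ECC71"  # Friendly green accent for Exasol visuals
--
-- def _build_system_color_map(systems: Sequence[str]) -> dict[str, str]:
--     """Return consistent colors per system, ensuring Exasol uses green."""
--     unique_norms: list[str] = []
--     for system in systems:
--         norm = system.strip().lower()
--         if norm not in unique_norms: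
--             unique_norms.append(norm)
--
--     palette = cycle(TECH_COLORS)
--     color_map: dict[str, str] = {}
--     for norm in unique_norms:
--         if "exasol" in norm:
--             color_map[norm] = EXASOL_COLOR
--         else:
--             color = next(palette)
--             while color.lower() == EXASOL_COLOR.lower():
--                 color = next(palette)
--             color_map[norm] = color
--     return color_map
-- ===== SOURCE B (Python) =====
-- TECH_COLORS = ["#2E86AB", "#A23B72", "#F18F01", "#C73E1D", "#577590", "#7209B7"]
--
-- EXASOL_COLOR = "#2ECC71"  # Friendly green accent for Exasol visuals
--
--
-- def _build_system_color_map(systems):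
--     """Single fused pass: dedup and color assignment at once, modular palette index."""
--     color_map = {}
--     count = 0
--     for system in systems:
--         norm = system.strip().lower()
--         if norm in color_map:
--             continue
--         if "exasol" in norm:
--             color_map[norm] = EXASOL_COLOR
--         else:
--             color_map[norm] = TECH_COLORS[count % len(TECH_COLORS)]
--             count += 1
--     return color_map
-- ===== Notes on version B (the rewrite author's own statement) =====
-- stated objective: faster
-- what changed: One fused pass over systems replaces A's two phases (dedup list with a linear membership scan per item, then itertools.cycle with a dead green-skip while loop): B uses the dict itself as the seen-set and picks colors by modular index on a counter of non-exasol entries.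
import Mathlib
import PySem

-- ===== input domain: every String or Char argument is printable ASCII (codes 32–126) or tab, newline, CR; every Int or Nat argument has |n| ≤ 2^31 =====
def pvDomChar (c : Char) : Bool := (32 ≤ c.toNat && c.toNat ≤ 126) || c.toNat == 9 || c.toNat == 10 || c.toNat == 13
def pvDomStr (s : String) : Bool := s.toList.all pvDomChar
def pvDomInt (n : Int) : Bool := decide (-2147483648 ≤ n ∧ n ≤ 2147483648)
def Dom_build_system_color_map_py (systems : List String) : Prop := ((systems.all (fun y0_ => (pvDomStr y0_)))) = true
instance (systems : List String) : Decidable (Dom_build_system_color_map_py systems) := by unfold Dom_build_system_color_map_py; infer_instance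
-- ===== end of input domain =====

-- B fuses A's dedup list-scan pass and cycle-based coloring pass into one dict-backed pass with a modular palette index (objective: faster; measured).
-- ===== PORT A =====
def pvTECH : List String := ["#2E86AB", "#A23B72", "#F18F01", "#C73E1D", "#577590", "#7209B7"]

def pvGREEN : String := "#2ECC71"

-- first loop of A: collect normalized names, first occurrences in order
def pvUniq : List String → List String → List String
  | [], acc => acc
  | s :: rest, acc =>
    let norm := PySem.Str.lower (PySem.Str.strip s)
    if acc.contains norm then pvUniq rest acc else pvUniq rest (acc ++ [norm])

-- next(palette): cycle(TECH_COLORS) as an index i; i % 6 < 6 = pvTECH.length, so getD is exact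
def pvNext (i : Nat) : String × Nat := (pvTECH.getD (i % 6) "", i + 1)

-- the 'while color.lower() == EXASOL_COLOR.lower(): color = next(palette)' loop; the condition
-- can only flip within one cycle of the 6-color palette (all colors equal after 6 steps), so
-- fuel 6 is exact where the Python loop terminates (and it always does: no palette color is green)
def pvSkipGreen : Nat → String → Nat → String × Nat
  | 0, c, i => (c, i)
  | fuel + 1, c, i =>
    if PySem.Str.lower c == PySem.Str.lower pvGREEN then
      let (c', i') := pvNext i
      pvSkipGreen fuel c' i'
    else (c, i)

-- second loop of A over unique_norms
def pvAssign : List String → PySem.Dict String String → Nat → PySem.Dict String String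
  | [], cm, _ => cm
  | n :: rest, cm, i =>
    if PySem.Str.isIn "exasol" n then pvAssign rest (cm.insert n pvGREEN) i
    else
      let (c0, i0) := pvNext i
      let (c, i') := pvSkipGreen 6 c0 i0
      pvAssign rest (cm.insert n c) i'

def build_system_color_map_py (systems : List String) : List (String × String) :=
  (pvAssign (pvUniq systems []) PySem.Dict.empty 0).items

-- ===== PORT B =====
-- single pass: the dict is the seen-set; count % 6 < 6 = pvTECH.length, so getD is exact
def pvBLoop : List String → PySem.Dict String String → Nat → PySem.Dict String String
  | [], cm, _ => cm
  | s :: rest, cm, count =>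
    let norm := PySem.Str.lower (PySem.Str.strip s)
    if cm.contains norm then pvBLoop rest cm count
    else if PySem.Str.isIn "exasol" norm then pvBLoop rest (cm.insert norm pvGREEN) count
    else pvBLoop rest (cm.insert norm (pvTECH.getD (count % 6) "")) (count + 1)

def build_system_color_map_py_alt (systems : List String) : List (String × String) :=
  (pvBLoop systems PySem.Dict.empty 0).items

-- ===== PRECONDITION & SPEC =====
def Spec_build_system_color_map_py (systems : List String) (out : List (String × String)) : Prop := out = build_system_color_map_py_alt systems
instance (systems : List String) (out : List (String × String)) : Decidable (Spec_build_system_color_map_py systems out) := by unfold Spec_build_system_color_map_py; infer_instance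

-- ===== CLAIM (what is proved, stated in full; the proofs are below) =====
def Claim_equal_build_system_color_map_py : Prop := ∀ (systems : List String), Dom_build_system_color_map_py systems → Spec_build_system_color_map_py systems (build_system_color_map_py systems)

-- ===== LEMMAS AND PROOFS =====

-- proof-side helper: only the NEW normalized names pvUniq appends beyond its accumulator
def pvU : List String → List String → List String
  | [], _ => []
  | s :: rest, acc =>
    let norm := PySem.Str.lower (PySem.Str.strip s)
    if acc.contains norm then pvU rest acc else norm :: pvU rest (acc ++ [norm])

lemma pvUniq_eq_append (ss : List String) : ∀ acc, pvUniq ss acc = acc ++ pvU ss acc := by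
  induction ss with
  | nil => intro acc; simp [pvUniq, pvU]
  | cons s rest ih =>
    intro acc
    simp only [pvUniq, pvU]
    split
    · exact ih acc
    · rw [ih (acc ++ [_])]; simp

lemma pvSkipGreen_id (c : String) (hc : c ∈ pvTECH) (i : Nat) : pvSkipGreen 6 c i = (c, i) := by
  fin_cases hc <;> rfl

lemma pvGetD_mem (i : Nat) : pvTECH.getD (i % 6) "" ∈ pvTECH := by
  have h : i % 6 < 6 := Nat.mod_lt _ (by omega)
  interval_cases h' : i % 6 <;> simp [pvTECH]

lemma pvMain (ss : List String) : ∀ (acc : List String) (cm : PySem.Dict String String) (i : Nat),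
    (∀ n, cm.contains n = acc.contains n) →
    pvBLoop ss cm i = pvAssign (pvU ss acc) cm i := by
  induction ss with
  | nil => intro acc cm i _; simp [pvBLoop, pvU, pvAssign]
  | cons s rest ih =>
    intro acc cm i hk
    simp only [pvBLoop, pvU]
    by_cases hmem : acc.contains (PySem.Str.lower (PySem.Str.strip s)) = true
    · simp only [hk, hmem, if_true]
      exact ih acc cm i hk
    · simp only [hk, hmem, Bool.false_eq_true, if_false]
      have hk' : ∀ v n, (cm.insert (PySem.Str.lower (PySem.Str.strip s)) v).contains n
          = (acc ++ [PySem.Str.lower (PySem.Str.strip s)]).contains n := by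
        intro v n
        rw [PySem.Dict.contains_insert, hk]
        cases h : n == PySem.Str.lower (PySem.Str.strip s) <;>
          simp_all [List.contains_eq_mem, Bool.or_comm]
      by_cases hex : PySem.Str.isIn "exasol" (PySem.Str.lower (PySem.Str.strip s)) = true
      · simp only [hex, if_true, pvAssign]
        exact ih _ _ i (hk' _)
      · simp only [hex, Bool.false_eq_true, if_false, pvAssign, pvNext]
        rw [pvSkipGreen_id _ (pvGetD_mem i)]
        exact ih _ _ (i + 1) (hk' _)

-- ===== VERDICT (by name: the statement is the Claim_ definition above) =====
theorem build_system_color_map_py_spec : Claim_equal_build_system_color_map_py := by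
  intro systems _
  unfold Spec_build_system_color_map_py build_system_color_map_py build_system_color_map_py_alt
  rw [pvUniq_eq_append, List.nil_append,
    pvMain systems [] PySem.Dict.empty 0 (fun n => by simp [PySem.Dict.contains_empty])]
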